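-- pv_equiv track=rewrite | github.com/hjoongpt-cloud/EMNIST | src_p/p_train.py | round_pairs_for_slots
-- ===== SOURCE A (Python) =====
-- from typing import Tuple, List
--
-- def round_pairs_for_slots(M: int, boxes: List[Tuple[int,int,int,int]]):
--     G = len(boxes)
--     all_pairs = []
--     for i in range(G):
--         for j in range(i+1, G):
--             all_pairs.append((i,j))
--     if len(all_pairs) == 0:
--         all_pairs = [(0,0)]
--     return [all_pairs[m % len(all_pairs)] for m in range(M)]
-- ===== SOURCE B (Python) =====
-- from typing import Tuple, List
--
-- def _advance(i, j, G):
--     j += 1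
--     if j == G:
--         i += 1
--         if i == G - 1:
--             return 0, 1
--         return i, i + 1
--     return i, j
--
-- def round_pairs_for_slots(M: int, boxes: List[Tuple[int,int,int,int]]):
--     # Stream the cyclic sequence with O(1) state: no pair list, no modulo.
--     G = len(boxes)
--     if G < 2:
--         return [(0, 0)] * M
--     out = []
--     i, j = 0, 1
--     for _ in range(M):
--         out.append((i, j))
--         i, j = _advance(i, j, G)
--     return out
-- ===== Notes on version B (the rewrite author's own statement) =====
-- stated objective: alternative
-- what changed: B never materialises the O(G^2) pair list: it streams the M output slots with an O(1)-state cursor (i,j) advanced once per slot (wrapping within and across rows), instead of building all upper-triangular pairs and indexing each slot by m % total.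
import Mathlib
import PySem

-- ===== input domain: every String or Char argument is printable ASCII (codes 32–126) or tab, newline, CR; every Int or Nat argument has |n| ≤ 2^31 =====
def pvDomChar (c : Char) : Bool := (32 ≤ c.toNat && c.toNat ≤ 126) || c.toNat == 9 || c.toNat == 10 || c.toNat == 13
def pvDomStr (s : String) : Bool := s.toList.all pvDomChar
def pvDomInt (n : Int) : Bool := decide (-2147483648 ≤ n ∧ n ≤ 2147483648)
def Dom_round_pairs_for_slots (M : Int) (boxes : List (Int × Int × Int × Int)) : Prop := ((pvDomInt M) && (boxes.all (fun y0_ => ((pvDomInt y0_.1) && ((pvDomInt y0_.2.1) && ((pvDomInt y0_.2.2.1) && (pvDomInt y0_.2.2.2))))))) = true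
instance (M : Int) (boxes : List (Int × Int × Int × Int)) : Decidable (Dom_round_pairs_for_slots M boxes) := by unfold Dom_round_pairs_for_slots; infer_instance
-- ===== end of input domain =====

-- B streams the M output slots with an O(1)-state cursor (i,j) advanced once per slot
-- (wrapping within and across rows), never materialising A's pair list nor indexing it
-- by m % total (objective: alternative).

-- ===== PORT A =====
def round_pairs_for_slots (M : Int) (boxes : List (Int × Int × Int × Int)) : List (Int × Int) :=
  let G : Int := boxes.length
  let all_pairs : List (Int × Int) :=
    (PySem.List.pyRange 0 G 1).foldl (fun acc i =>
      (PySem.List.pyRange (i+1) G 1).foldl (fun acc2 j => acc2 ++ [(i, j)]) acc) []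
  let all_pairs := if all_pairs.length = 0 then [((0:Int), (0:Int))] else all_pairs
  -- all_pairs[m % len(all_pairs)]: the index is always in range (len ≥ 1), so pyGetD is exact
  (PySem.List.pyRange 0 M 1).map (fun m =>
    PySem.List.pyGetD all_pairs (PySem.Int.mod m (all_pairs.length : Int)) (0, 0))

-- ===== PORT B =====
-- Source B's _advance(i, j, G): move the O(1) cursor to the next upper-triangular pair
def altStep (G : Int) (p : Int × Int) : Int × Int :=
  if p.2 + 1 = G then
    (if p.1 + 1 = G - 1 then ((0:Int), (1:Int)) else (p.1 + 1, p.1 + 2))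
  else (p.1, p.2 + 1)

-- Source B's 'for _ in range(M)' loop: emit the cursor, then advance it
def altLoop (G : Int) : Nat → (Int × Int) → List (Int × Int)
  | 0, _ => []
  | n+1, s => s :: altLoop G n (altStep G s)

def round_pairs_for_slots_alt (M : Int) (boxes : List (Int × Int × Int × Int)) : List (Int × Int) :=
  let G : Int := boxes.length
  if G < 2 then List.replicate M.toNat ((0:Int), (0:Int))
  else altLoop G M.toNat (0, 1)

-- ===== PRECONDITION & SPEC =====
def Spec_round_pairs_for_slots (M : Int) (boxes : List (Int × Int × Int × Int)) (out : List (Int × Int)) : Prop := out = round_pairs_for_slots_alt M boxes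
instance (M : Int) (boxes : List (Int × Int × Int × Int)) (out : List (Int × Int)) : Decidable (Spec_round_pairs_for_slots M boxes out) := by unfold Spec_round_pairs_for_slots; infer_instance

-- ===== CLAIM (what is proved, stated in full; the proofs are below) =====
def Claim_equal_round_pairs_for_slots : Prop := ∀ (M : Int) (boxes : List (Int × Int × Int × Int)), Dom_round_pairs_for_slots M boxes → Spec_round_pairs_for_slots M boxes (round_pairs_for_slots M boxes)

-- ===== LEMMAS AND PROOFS =====

-- the full upper-triangular pair list, as a flatMap
def pvPairs (G : Int) : List (Int × Int) :=
  (PySem.List.pyRange 0 G 1).flatMap (fun i => (PySem.List.pyRange (i+1) G 1).map (fun j => (i, j)))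

theorem pvA_pairs (G : Int) :
    (PySem.List.pyRange 0 G 1).foldl (fun acc i =>
      (PySem.List.pyRange (i+1) G 1).foldl (fun acc2 j => acc2 ++ [(i, j)]) acc) [] = pvPairs G := by
  simp only [PySem.List.foldl_append_singleton_eq_map]
  rw [PySem.List.foldl_append_eq_flatMap]
  simp [pvPairs]

-- mapping over range with getD over full prefixes: take form
theorem pvMapRangeGetD (P : List (Int × Int)) (n : Nat) (hn : n ≤ P.length) :
    (List.range n).map (fun m => P.getD m ((0:Int), (0:Int))) = P.take n := by
  induction n with
  | zero => simp
  | succ n ih =>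
    rw [List.range_succ, List.map_append, ih (by omega), List.take_succ]
    simp [List.getD_eq_getElem P _ (by omega : n < P.length), List.getElem?_eq_getElem (by omega : n < P.length)]

-- the central cyclic-indexing identity: indexing m % L over range n equals q copies plus a prefix
theorem pvMapRangeMod (P : List (Int × Int)) (hP : P ≠ []) (n : Nat) :
    (List.range n).map (fun m => P.getD (m % P.length) ((0:Int), (0:Int))) =
      (List.replicate (n / P.length) P).flatten ++ P.take (n % P.length) := by
  have hL : 0 < P.length := List.length_pos_of_ne_nil hP
  induction n using Nat.strong_induction_on with
  | _ n IH =>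
    by_cases h : n < P.length
    · rw [Nat.div_eq_of_lt h, Nat.mod_eq_of_lt h]
      rw [List.map_congr_left (fun m hm => by
        rw [Nat.mod_eq_of_lt (lt_trans (List.mem_range.mp hm) h)])]
      exact pvMapRangeGetD P n (by omega)
    · push_neg at h
      have hk : n = P.length + (n - P.length) := by omega
      rw [hk, List.range_add, List.map_append, List.map_map]
      have h1 : (List.range P.length).map (fun m => P.getD (m % P.length) ((0:Int), (0:Int))) = P := by
        rw [List.map_congr_left (fun m hm => by rw [Nat.mod_eq_of_lt (List.mem_range.mp hm)])]
        simpa using pvMapRangeGetD P P.length le_rfl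
      have h2 : ((fun m => P.getD (m % P.length) ((0:Int), (0:Int))) ∘ fun x => P.length + x) =
          fun m => P.getD (m % P.length) ((0:Int), (0:Int)) := by
        funext m; simp [Nat.add_mod_left]
      rw [h1, h2, IH (n - P.length) (by omega)]
      rw [show P.length + (n - P.length) = (n - P.length) + P.length by omega,
        Nat.add_div_right _ hL, Nat.add_mod_right]
      rw [List.replicate_succ, List.flatten_cons, List.append_assoc]

-- A's result in closed form, for 0 < M
theorem pvA_closed (M : Int) (boxes : List (Int × Int × Int × Int)) (hM : 0 < M) :
    round_pairs_for_slots M boxes =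
      (let P := if pvPairs (boxes.length : Int) = [] then [((0:Int), (0:Int))] else pvPairs (boxes.length : Int)
       (List.replicate (M.toNat / P.length) P).flatten ++ P.take (M.toNat % P.length)) := by
  unfold round_pairs_for_slots
  dsimp only
  rw [pvA_pairs]
  simp only [List.length_eq_zero_iff]
  set P := if pvPairs (boxes.length : Int) = [] then [((0:Int), (0:Int))] else pvPairs (boxes.length : Int) with hP
  have hPne : P ≠ [] := by
    rw [hP]; split <;> simp_all
  have hMn : M = (M.toNat : Int) := by omega
  rw [hMn, PySem.List.pyRange_one]
  simp only [sub_zero, Int.toNat_natCast, List.map_map]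
  rw [List.map_congr_left (fun k _ => by
    show PySem.List.pyGetD P (PySem.Int.mod ((0:Int) + (k:Int)) ((P.length : Nat) : Int)) ((0:Int), (0:Int)) =
      P.getD (k % P.length) ((0:Int), (0:Int))
    rw [zero_add, PySem.Int.mod_natCast k P.length, PySem.List.pyGetD_natCast])]
  exact pvMapRangeMod P hPne M.toNat

-- B-side: a shorter run of the loop is a prefix of a longer one (same start state)
theorem pvAltLoop_take (G : Int) (n m : Nat) (h : n ≤ m) (s : Int × Int) :
    altLoop G n s = (altLoop G m s).take n := by
  induction n generalizing m s with
  | zero => simp [altLoop]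
  | succ n ih =>
    obtain ⟨m', rfl⟩ : ∃ m', m = m' + 1 := ⟨m - 1, by omega⟩
    simp only [altLoop, List.take_succ_cons]
    rw [ih m' (by omega)]

-- B-side row lemma: starting at (i, j) the loop emits the rest of row i, then continues
-- from the state after (i, G-1)
theorem pvAltLoop_row (G : Int) (n : Nat) (hn : 1 ≤ n) (i j : Int) (hij : i < j)
    (hjn : j + (n : Int) = G) (e : Nat) :
    altLoop G (n + e) (i, j) =
      ((PySem.List.pyRange j G 1).map (fun k => (i, k))) ++ altLoop G e (altStep G (i, G - 1)) := by
  induction n generalizing j with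
  | zero => omega
  | succ n ih =>
    by_cases h0 : n = 0
    · subst h0
      have hj : j = G - 1 := by omega
      have hr : PySem.List.pyRange j G 1 = [j] := by
        have := PySem.List.pyRange_one_singleton j
        rwa [show j + 1 = G by omega] at this
      rw [hr, show (0 : Nat) + 1 + e = e + 1 by omega]
      show (i, j) :: altLoop G e (altStep G (i, j)) = _
      rw [hj]
      simp
    · have hjG : j < G := by omega
      rw [PySem.List.pyRange_one_cons hjG]
      have hstep : altStep G (i, j) = (i, j + 1) := by
        unfold altStep
        rw [if_neg (by omega : ¬ j + 1 = G)]
      rw [show n + 1 + e = (n + e) + 1 by omega]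
      show (i, j) :: altLoop G (n + e) (altStep G (i, j)) = _
      rw [hstep, ih (by omega) (j + 1) (by omega) (by push_cast; omega)]
      simp

-- B-side rows lemma: starting at (i, i+1) the loop emits all rows from i on, then is back at (0, 1)
theorem pvAltLoop_rows (G : Int) (n : Nat) (hn : 1 ≤ n) (i : Int) (hi : 0 ≤ i)
    (hin : i + (n : Int) = G - 1) (e : Nat) :
    altLoop G
        (((PySem.List.pyRange i G 1).flatMap (fun a => (PySem.List.pyRange (a+1) G 1).map (fun b => (a, b)))).length + e)
        (i, i + 1) =
      ((PySem.List.pyRange i G 1).flatMap (fun a => (PySem.List.pyRange (a+1) G 1).map (fun b => (a, b)))) ++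
        altLoop G e (0, 1) := by
  induction n generalizing i with
  | zero => omega
  | succ n ih =>
    have hiG : i < G := by omega
    rw [PySem.List.pyRange_one_cons hiG, List.flatMap_cons]
    by_cases h0 : n = 0
    · subst h0
      have hieq : i = G - 2 := by omega
      subst hieq
      have hr2 : PySem.List.pyRange (G - 1) G 1 = [G - 1] := by
        have := PySem.List.pyRange_one_singleton (G - 1)
        rwa [show G - 1 + 1 = G by ring] at this
      have hr1 : PySem.List.pyRange (G - 2 + 1) G 1 = [G - 1] := by
        rw [show G - 2 + 1 = G - 1 by ring]; exact hr2
      have hr3 : PySem.List.pyRange (G - 1 + 1) G 1 = [] :=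
        PySem.List.pyRange_one_eq_nil (by omega)
      rw [hr1]
      simp only [List.map_cons, List.map_nil, List.flatMap_cons, List.flatMap_nil, hr3,
        List.append_nil, List.length_cons, List.length_nil]
      rw [show (0 : Nat) + 1 + e = e + 1 by omega]
      show (G - 2, G - 2 + 1) :: altLoop G e (altStep G (G - 2, G - 2 + 1)) = _
      have : altStep G (G - 2, G - 2 + 1) = ((0:Int), (1:Int)) := by
        unfold altStep
        rw [if_pos (by ring : G - 2 + 1 + 1 = G), if_pos (by ring : G - 2 + 1 = G - 1)]
      rw [this]
      simp
      omega
    · -- row i, then rows from i+1 by IH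
      have hrow := pvAltLoop_row G (G - (i+1)).toNat (by omega) i (i + 1) (by omega)
        (by push_cast; omega)
      have hlenrow : ((PySem.List.pyRange (i+1) G 1).map (fun b => (i, b))).length = (G - (i+1)).toNat := by
        rw [List.length_map, PySem.List.length_pyRange_one]
      have hstep : altStep G (i, G - 1) = (i + 1, i + 2) := by
        unfold altStep
        rw [if_pos (by ring : G - 1 + 1 = G), if_neg (by omega : ¬ i + 1 = G - 1)]
      rw [List.length_append, hlenrow,
        show (G - (i+1)).toNat +
            ((PySem.List.pyRange (i+1) G 1).flatMap (fun a => (PySem.List.pyRange (a+1) G 1).map (fun b => (a, b)))).length + e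
          = (G - (i+1)).toNat +
            (((PySem.List.pyRange (i+1) G 1).flatMap (fun a => (PySem.List.pyRange (a+1) G 1).map (fun b => (a, b)))).length + e) by omega,
        hrow, hstep]
      rw [show (i + 2 : Int) = (i + 1) + 1 by ring]
      rw [ih (by omega) (i + 1) (by omega) (by push_cast; omega)]
      simp

-- one full cycle of B's loop emits pvPairs G and returns the cursor to (0, 1)
theorem pvAltLoop_cycle (G : Int) (hG : 2 ≤ G) (e : Nat) :
    altLoop G ((pvPairs G).length + e) (0, 1) = pvPairs G ++ altLoop G e (0, 1) := by
  have := pvAltLoop_rows G (G - 1).toNat (by omega) 0 le_rfl (by push_cast; omega) e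
  simpa [pvPairs] using this

theorem pvPairs_ne_nil (G : Int) (hG : 2 ≤ G) : pvPairs G ≠ [] := by
  have : ((0:Int), (1:Int)) ∈ pvPairs G := by
    unfold pvPairs
    refine List.mem_flatMap.mpr ⟨0, ?_, ?_⟩
    · rw [PySem.List.mem_pyRange_one]; omega
    · refine List.mem_map.mpr ⟨1, ?_, rfl⟩
      rw [PySem.List.mem_pyRange_one]; omega
  exact List.ne_nil_of_mem this

-- B's loop in the same closed form as A
theorem pvAltLoop_closed (G : Int) (hG : 2 ≤ G) (n : Nat) :
    altLoop G n (0, 1) =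
      (List.replicate (n / (pvPairs G).length) (pvPairs G)).flatten ++
        (pvPairs G).take (n % (pvPairs G).length) := by
  have hL : 0 < (pvPairs G).length := List.length_pos_of_ne_nil (pvPairs_ne_nil G hG)
  induction n using Nat.strong_induction_on with
  | _ n IH =>
    by_cases h : n < (pvPairs G).length
    · rw [Nat.div_eq_of_lt h, Nat.mod_eq_of_lt h]
      rw [pvAltLoop_take G n (pvPairs G).length (by omega) (0, 1)]
      have := pvAltLoop_cycle G hG 0
      simp only [Nat.add_zero, altLoop, List.append_nil] at this
      rw [this]
      simp
    · push_neg at h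
      rw [show n = (pvPairs G).length + (n - (pvPairs G).length) by omega,
        pvAltLoop_cycle G hG, IH (n - (pvPairs G).length) (by omega)]
      rw [show (pvPairs G).length + (n - (pvPairs G).length) = (n - (pvPairs G).length) + (pvPairs G).length by omega,
        Nat.add_div_right _ hL, Nat.add_mod_right]
      rw [List.replicate_succ, List.flatten_cons, List.append_assoc]

-- for fewer than two boxes there are no pairs
theorem pvPairs_nil (G : Int) (h : G < 2) : pvPairs G = [] := by
  unfold pvPairs
  by_cases h0 : G ≤ 0
  · rw [PySem.List.pyRange_one_eq_nil h0]
    simp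
  · have hG1 : G = 1 := by omega
    subst hG1
    decide

-- ===== VERDICT (by name: the statement is the Claim_ definition above) =====
theorem round_pairs_for_slots_spec : Claim_equal_round_pairs_for_slots := by
  intro M boxes _
  show round_pairs_for_slots M boxes = round_pairs_for_slots_alt M boxes
  by_cases hM : M ≤ 0
  · unfold round_pairs_for_slots round_pairs_for_slots_alt
    dsimp only
    rw [PySem.List.pyRange_one_eq_nil hM]
    have : M.toNat = 0 := by omega
    split <;> simp [this, altLoop]
  · push_neg at hM
    rw [pvA_closed M boxes hM]
    unfold round_pairs_for_slots_alt
    dsimp only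
    by_cases hG : (boxes.length : Int) < 2
    · rw [if_pos hG]
      have hPe : pvPairs (boxes.length : Int) = [] := pvPairs_nil _ hG
      rw [hPe]
      simp [Nat.mod_one]
    · push_neg at hG
      rw [if_neg (by omega : ¬ (boxes.length : Int) < 2)]
      rw [if_neg (pvPairs_ne_nil (boxes.length : Int) hG)]
      exact (pvAltLoop_closed (boxes.length : Int) hG M.toNat).symm
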